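-- pv_equiv track=rewrite | github.com/JuliaHofmeister22/Checkers_AI_FALL2018 | P2.py | blockCrowningMove
-- ===== SOURCE A (Python) =====
-- def blockCrowningMove(playerMoves,opponentMoves):
--     pcopy=playerMoves
--     ocopy=opponentMoves
--     blockList=[]
--     for omove in ocopy:
--         for move in pcopy:
--             if omove[-2:]==move[-2:]:
--                 blockList.append(move)
--     return blockList
-- ===== SOURCE B (Python) =====
-- def blockCrowningMove(playerMoves, opponentMoves):
--     index = {}
--     for move in playerMoves:
--         index.setdefault(move[-2:], []).append(move)
--     return [m for omove in opponentMoves for m in index.get(omove[-2:], [])]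
-- ===== Notes on version B (the rewrite author's own statement) =====
-- stated objective: faster
-- what changed: B builds a dict grouping playerMoves by their last-two-character key in one pass, then concatenates the per-key groups looked up for each opponent move, replacing A's nested scan.
import Mathlib
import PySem

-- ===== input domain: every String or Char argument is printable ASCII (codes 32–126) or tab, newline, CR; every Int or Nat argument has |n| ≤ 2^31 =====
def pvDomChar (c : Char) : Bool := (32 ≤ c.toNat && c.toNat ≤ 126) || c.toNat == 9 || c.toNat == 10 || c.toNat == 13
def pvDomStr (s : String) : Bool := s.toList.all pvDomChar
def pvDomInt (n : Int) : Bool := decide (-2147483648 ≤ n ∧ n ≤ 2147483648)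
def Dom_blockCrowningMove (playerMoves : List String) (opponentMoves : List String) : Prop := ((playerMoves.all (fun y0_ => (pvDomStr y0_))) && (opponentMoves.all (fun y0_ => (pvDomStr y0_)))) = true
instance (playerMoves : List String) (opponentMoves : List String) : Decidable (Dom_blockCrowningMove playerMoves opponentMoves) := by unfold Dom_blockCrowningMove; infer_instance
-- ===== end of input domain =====

-- B replaces A's nested scan by a one-pass dict grouping playerMoves by their last-two key,
-- then a lookup per opponent move (objective: faster, asymptotic).

-- s[-2:] as a list of characters (shared helper of both ports)
def pvKey (s : String) : List Char := PySem.List.slice s.toList (some (-2)) none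

-- ===== PORT A =====
def blockCrowningMove (playerMoves : List String) (opponentMoves : List String) : List String :=
  -- pcopy / ocopy are the same lists; blockList accumulated through the nested loops
  opponentMoves.foldl (fun blockList omove =>
    playerMoves.foldl (fun blockList move =>
      if pvKey omove == pvKey move then blockList ++ [move] else blockList) blockList) []

-- ===== PORT B =====
-- index.setdefault(move[-2:], []).append(move)  ==  index[k] = index.get(k, []) + [move]
def pvIndex (playerMoves : List String) : PySem.Dict (List Char) (List String) :=
  playerMoves.foldl (fun d move => d.modify (pvKey move) [] (fun l => l ++ [move])) PySem.Dict.empty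

def blockCrowningMove_alt (playerMoves : List String) (opponentMoves : List String) : List String :=
  let index := pvIndex playerMoves
  opponentMoves.flatMap (fun omove => index.getD (pvKey omove) [])

-- ===== PRECONDITION & SPEC =====
def Spec_blockCrowningMove (playerMoves : List String) (opponentMoves : List String) (out : List String) : Prop := out = blockCrowningMove_alt playerMoves opponentMoves
instance (playerMoves : List String) (opponentMoves : List String) (out : List String) : Decidable (Spec_blockCrowningMove playerMoves opponentMoves out) := by unfold Spec_blockCrowningMove; infer_instance

-- ===== CLAIM (what is proved, stated in full; the proofs are below) =====
def Claim_equal_blockCrowningMove : Prop := ∀ (playerMoves : List String) (opponentMoves : List String), Dom_blockCrowningMove playerMoves opponentMoves → Spec_blockCrowningMove playerMoves opponentMoves (blockCrowningMove playerMoves opponentMoves)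

-- ===== LEMMAS AND PROOFS =====

-- the grouping dict looked up at key c is exactly the filter of playerMoves by that key
theorem pvIndex_getD (pm : List String) (c : List Char) :
    (pvIndex pm).getD c [] = pm.filter (fun m => pvKey m == c) := by
  unfold pvIndex
  suffices h : ∀ (d : PySem.Dict (List Char) (List String)),
      (pm.foldl (fun d move => d.modify (pvKey move) [] (fun l => l ++ [move])) d).getD c []
        = d.getD c [] ++ pm.filter (fun m => pvKey m == c) by
    simpa [PySem.Dict.getD_empty] using h PySem.Dict.empty
  induction pm with
  | nil => simp
  | cons m rest ih =>
    intro d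
    simp only [List.foldl_cons, ih, List.filter_cons]
    rw [PySem.Dict.getD_modify]
    by_cases hk : pvKey m = c
    · simp [hk]
    · simp [Ne.symm hk, (by simpa using hk : ¬ (pvKey m == c) = true)]

theorem blockCrowningMove_spec : Claim_equal_blockCrowningMove := by
  intro pm om _
  unfold Spec_blockCrowningMove blockCrowningMove blockCrowningMove_alt
  simp only []
  have inner : ∀ (o : String) (acc : List String),
      pm.foldl (fun blockList move =>
        if pvKey o == pvKey move then blockList ++ [move] else blockList) acc
        = acc ++ pm.filter (fun m => pvKey m == pvKey o) := by
    intro o acc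
    have := PySem.List.foldl_append_if (fun move => pvKey o == pvKey move) id pm acc
    simpa [List.map_id, Function.comp, BEq.comm (a := pvKey o)] using this
  calc om.foldl (fun blockList omove =>
          pm.foldl (fun blockList move =>
            if pvKey omove == pvKey move then blockList ++ [move] else blockList) blockList) []
      = om.foldl (fun acc omove => acc ++ pm.filter (fun m => pvKey m == pvKey omove)) [] := by
        exact PySem.List.foldl_congr_mem om _ _ [] (fun acc o _ => inner o acc)
    _ = om.flatMap (fun omove => pm.filter (fun m => pvKey m == pvKey omove)) := by
        simpa using PySem.List.foldl_append_eq_flatMap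
          (fun omove => pm.filter (fun m => pvKey m == pvKey omove)) om []
    _ = om.flatMap (fun omove => (pvIndex pm).getD (pvKey omove) []) := by
        simp [pvIndex_getD]
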